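-- pv_equiv track=rewrite | github.com/MateoAngulo/Ensamblador | RiscV/main.py | find_the_type
-- ===== SOURCE A (Python) =====
-- def find_the_type(dictionary,word):
--     type=""
--     for new_k,new_val in dictionary.items():
--         for i in new_val:
--             if word==i:
--                 type=new_k # Si encuentra la palabra en el valor del diccionario, guarda la clave correspondiente (el tipo)
--
--                 break
--     return type
-- ===== SOURCE B (Python) =====
-- def find_the_type(dictionary, word):
--     # Build a reverse index word -> key in one pass (later keys overwrite),
--     # then answer with a single lookup.
--     index = {}
--     for key, values in dictionary.items():
--         for w in values:
--             index[w] = key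
--     return index.get(word, "")
-- ===== Notes on version B (the rewrite author's own statement) =====
-- stated objective: alternative
-- what changed: Replaces the nested scan (with per-list break) by building a reverse index dict word->key in one pass and answering with a single lookup; plain overwrite reproduces the last-match tie-break.
import Mathlib
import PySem

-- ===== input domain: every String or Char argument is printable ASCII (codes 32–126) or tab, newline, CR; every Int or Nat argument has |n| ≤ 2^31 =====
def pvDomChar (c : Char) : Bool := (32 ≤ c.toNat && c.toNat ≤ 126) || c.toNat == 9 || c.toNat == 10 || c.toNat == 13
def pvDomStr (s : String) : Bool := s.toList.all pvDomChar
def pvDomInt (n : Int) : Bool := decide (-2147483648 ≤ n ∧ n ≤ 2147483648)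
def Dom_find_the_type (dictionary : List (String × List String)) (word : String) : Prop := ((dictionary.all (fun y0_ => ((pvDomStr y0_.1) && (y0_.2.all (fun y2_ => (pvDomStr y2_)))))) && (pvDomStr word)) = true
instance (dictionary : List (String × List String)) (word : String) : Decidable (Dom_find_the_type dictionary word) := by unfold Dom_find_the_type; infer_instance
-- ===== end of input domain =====

-- B replaces A's nested scan by building a reverse index (word -> key, later keys
-- overwrite) and answering with one lookup; same cost, different structure.

-- ===== PORT A =====
-- inner 'for i in new_val: if word == i: type = new_k; break'
def pvInnerA (word new_k : String) (t : String) : List String → String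
  | [] => t
  | i :: rest => if word == i then new_k else pvInnerA word new_k t rest

def find_the_type (dictionary : List (String × List String)) (word : String) : String :=
  dictionary.foldl (fun t kv => pvInnerA word kv.1 t kv.2) ""

-- ===== PORT B =====
def find_the_type_alt (dictionary : List (String × List String)) (word : String) : String :=
  let index : PySem.Dict String String :=
    dictionary.foldl (fun idx kv => kv.2.foldl (fun a w => a.insert w kv.1) idx) PySem.Dict.empty
  index.getD word ""

-- ===== PRECONDITION & SPEC =====
def Spec_find_the_type (dictionary : List (String × List String)) (word : String) (out : String) : Prop := out = find_the_type_alt dictionary word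
instance (dictionary : List (String × List String)) (word : String) (out : String) : Decidable (Spec_find_the_type dictionary word out) := by unfold Spec_find_the_type; infer_instance

-- ===== CLAIM (what is proved, stated in full; the proofs are below) =====
def Claim_equal_find_the_type : Prop := ∀ (dictionary : List (String × List String)) (word : String), Dom_find_the_type dictionary word → Spec_find_the_type dictionary word (find_the_type dictionary word)

-- ===== LEMMAS AND PROOFS =====

-- A's inner loop started with accumulator equal to the current key returns that key.
theorem pvInnerA_const (word k : String) (v : List String) :
    pvInnerA word k k v = k := by
  induction v with
  | nil => rfl
  | cons i rest ih => simp only [pvInnerA]; split <;> simp [ih]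

-- One dictionary entry: A's inner scan from the current lookup value equals the
-- lookup after B's inner insert loop.
theorem pvInner_step (word k : String) (v : List String) (idx : PySem.Dict String String) :
    pvInnerA word k (idx.getD word "") v
      = (v.foldl (fun a w => a.insert w k) idx).getD word "" := by
  induction v generalizing idx with
  | nil => rfl
  | cons i rest ih =>
    simp only [pvInnerA, List.foldl_cons]
    rw [← ih (idx.insert i k)]
    by_cases h : word = i
    · subst h
      rw [PySem.Dict.getD_insert_self, pvInnerA_const, if_pos (by simp)]
    · rw [PySem.Dict.getD_insert, if_neg h, if_neg (by simpa using h)]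

-- The whole loops agree for any starting index/accumulator pair that agree on word.
theorem pv_main (word : String) (d : List (String × List String))
    (idx : PySem.Dict String String) :
    d.foldl (fun t kv => pvInnerA word kv.1 t kv.2) (idx.getD word "")
      = (d.foldl (fun i kv => kv.2.foldl (fun a w => a.insert w kv.1) i) idx).getD word "" := by
  induction d generalizing idx with
  | nil => rfl
  | cons kv rest ih =>
    simp only [List.foldl_cons]
    rw [pvInner_step, ih]

-- ===== VERDICT (by name: the statement is the Claim_ definition above) =====
theorem find_the_type_spec : Claim_equal_find_the_type := by
  intro d word _
  unfold Spec_find_the_type find_the_type find_the_type_alt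
  have h := pv_main word d PySem.Dict.empty
  simpa [PySem.Dict.getD_empty] using h
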